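-- pv_equiv track=rewrite | github.com/Vaisakh-Nirupam/LeetCode | 07_hotel_booking.py | hotel_manager
-- ===== SOURCE A (Python) =====
-- def hotel_manager(arrive,depart,k):
--     bookings = [(i,1) for i in arrive] + [(i,-1) for i in depart]
--     bookings.sort()
--     guests = 0
--     for _,i in bookings:
--         guests+=i
--         if guests > k:
--             return 0
--     return 1
-- ===== SOURCE B (Python) =====
-- def hotel_manager(arrive, depart, k):
--     arr = sorted(arrive)
--     dep = sorted(depart)
--     n, m = len(arr), len(dep)
--     guests = 0
--     i = j = 0
--     while i < n or j < m:
--         if j >= m or (i < n and arr[i] < dep[j]):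
--             guests += 1
--             i += 1
--         else:
--             guests -= 1
--             j += 1
--         if guests > k:
--             return 0
--     return 1
-- ===== Notes on version B (the rewrite author's own statement) =====
-- stated objective: faster
-- what changed: Replaces A's single sort of a combined tagged event list by sorting arrivals and departures separately and merging them with two pointers and a running guest counter checked after every event.
import Mathlib
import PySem

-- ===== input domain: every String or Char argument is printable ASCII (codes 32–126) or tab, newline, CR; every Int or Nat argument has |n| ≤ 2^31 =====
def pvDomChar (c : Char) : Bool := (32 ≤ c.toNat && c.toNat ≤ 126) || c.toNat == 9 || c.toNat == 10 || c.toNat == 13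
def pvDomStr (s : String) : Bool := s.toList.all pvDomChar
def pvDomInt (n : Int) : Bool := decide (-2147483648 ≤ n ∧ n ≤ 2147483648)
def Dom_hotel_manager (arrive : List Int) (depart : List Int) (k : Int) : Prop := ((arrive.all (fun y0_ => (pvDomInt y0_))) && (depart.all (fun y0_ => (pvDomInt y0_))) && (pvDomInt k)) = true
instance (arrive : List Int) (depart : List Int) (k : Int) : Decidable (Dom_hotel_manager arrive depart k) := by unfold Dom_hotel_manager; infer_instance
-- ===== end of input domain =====

-- B sorts arrive and depart separately and merges them with two pointers instead of
-- sorting A's combined tagged event list; equivalence of the RETURN value is proved for all inputs.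

-- ===== PORT A =====
-- the 'for _, i in bookings' loop with its early 'return 0'
def pvLoopA (k : Int) : List (Int × Int) → Int → Int
  | [], _ => 1
  | (_, i) :: rest, guests =>
      if guests + i > k then 0 else pvLoopA k rest (guests + i)

def hotel_manager (arrive : List Int) (depart : List Int) (k : Int) : Int :=
  pvLoopA k
    (PySem.List.sorted2
      (arrive.map (fun t => (t, (1 : Int))) ++ depart.map (fun t => (t, (-1 : Int))))
      Prod.fst Prod.snd) 0

-- ===== PORT B =====
-- the two-pointer while loop of Source B: pick the next event, update guests, check capacity
def pvLoopB (k : Int) : List Int → List Int → Int → Int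
  | [], [], _ => 1
  | a :: arr, [], guests =>
      if guests + 1 > k then 0 else pvLoopB k arr [] (guests + 1)
  | [], _ :: dep, guests =>
      if guests - 1 > k then 0 else pvLoopB k [] dep (guests - 1)
  | a :: arr, d :: dep, guests =>
      if a < d then
        (if guests + 1 > k then 0 else pvLoopB k arr (d :: dep) (guests + 1))
      else
        (if guests - 1 > k then 0 else pvLoopB k (a :: arr) dep (guests - 1))

def hotel_manager_alt (arrive : List Int) (depart : List Int) (k : Int) : Int :=
  pvLoopB k (PySem.List.sorted arrive (fun x => x)) (PySem.List.sorted depart (fun x => x)) 0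

-- ===== PRECONDITION & SPEC =====
def Spec_hotel_manager (arrive : List Int) (depart : List Int) (k : Int) (out : Int) : Prop := out = hotel_manager_alt arrive depart k
instance (arrive : List Int) (depart : List Int) (k : Int) (out : Int) : Decidable (Spec_hotel_manager arrive depart k out) := by unfold Spec_hotel_manager; infer_instance

-- ===== CLAIM (what is proved, stated in full; the proofs are below) =====
def Claim_equal_hotel_manager : Prop := ∀ (arrive : List Int) (depart : List Int) (k : Int), Dom_hotel_manager arrive depart k → Spec_hotel_manager arrive depart k (hotel_manager arrive depart k)

-- ===== LEMMAS AND PROOFS =====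

-- the event sequence B's two-pointer loop walks, as an explicit list
def pvMerge : List Int → List Int → List (Int × Int)
  | [], [] => []
  | a :: arr, [] => (a, 1) :: pvMerge arr []
  | [], d :: dep => (d, -1) :: pvMerge [] dep
  | a :: arr, d :: dep =>
      if a < d then (a, 1) :: pvMerge arr (d :: dep)
      else (d, -1) :: pvMerge (a :: arr) dep

theorem pvLoopB_eq_loopA (k : Int) (arr dep : List Int) (g : Int) :
    pvLoopB k arr dep g = pvLoopA k (pvMerge arr dep) g := by
  induction arr, dep using pvMerge.induct generalizing g with
  | case1 => simp [pvLoopB, pvMerge, pvLoopA]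
  | case2 a arr ih => simp only [pvLoopB, pvMerge, pvLoopA]; rw [ih]
  | case3 d dep ih =>
      simp only [pvLoopB, pvMerge, pvLoopA]
      have : g + (-1) = g - 1 := by ring
      rw [this, ih]
  | case4 a arr d dep h ih =>
      simp only [pvLoopB, pvMerge, pvLoopA, if_pos h]; rw [ih]
  | case5 a arr d dep h ih =>
      simp only [pvLoopB, pvMerge, pvLoopA, if_neg h]
      have : g + (-1) = g - 1 := by ring
      rw [this, ih]

theorem pvMerge_perm (arr dep : List Int) :
    (pvMerge arr dep).Perm (arr.map (fun t => (t, (1 : Int))) ++ dep.map (fun t => (t, (-1 : Int)))) := by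
  induction arr, dep using pvMerge.induct with
  | case1 => simp [pvMerge]
  | case2 a arr ih =>
      simp only [pvMerge, List.map_cons, List.cons_append]
      exact ih.cons (a, 1)
  | case3 d dep ih =>
      simp only [pvMerge, List.map_nil, List.map_cons, List.nil_append]
      exact ih.cons (d, -1)
  | case4 a arr d dep h ih =>
      simp only [pvMerge, if_pos h, List.map_cons, List.cons_append]
      exact ih.cons (a, 1)
  | case5 a arr d dep h ih =>
      simp only [pvMerge, if_neg h, List.map_cons]
      exact (ih.cons (d, -1)).trans List.perm_middle.symm

theorem pvMerge_mem {arr dep : List Int} {p : Int × Int} (hp : p ∈ pvMerge arr dep) :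
    (p.2 = 1 ∧ p.1 ∈ arr) ∨ (p.2 = -1 ∧ p.1 ∈ dep) := by
  have := (pvMerge_perm arr dep).mem_iff.mp hp
  rcases List.mem_append.mp this with h | h
  · rcases List.mem_map.mp h with ⟨t, ht, rfl⟩; exact Or.inl ⟨rfl, ht⟩
  · rcases List.mem_map.mp h with ⟨t, ht, rfl⟩; exact Or.inr ⟨rfl, ht⟩

-- lexicographic ≤ used to pin down Python's tuple sort order
def pvLexLe (p q : Int × Int) : Prop := p.1 < q.1 ∨ (p.1 = q.1 ∧ p.2 ≤ q.2)

theorem pvMerge_pairwise (arr dep : List Int)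
    (ha : arr.Pairwise (· ≤ ·)) (hd : dep.Pairwise (· ≤ ·)) :
    (pvMerge arr dep).Pairwise pvLexLe := by
  induction arr, dep using pvMerge.induct with
  | case1 => simp [pvMerge]
  | case2 a arr ih =>
      rw [List.pairwise_cons] at ha
      simp only [pvMerge]
      refine List.pairwise_cons.mpr ⟨?_, ih ha.2 hd⟩
      intro p hp
      rcases pvMerge_mem hp with ⟨h2, h1⟩ | ⟨h2, h1⟩
      · rcases lt_or_eq_of_le (ha.1 _ h1) with h | h
        · exact Or.inl h
        · exact Or.inr ⟨h, by omega⟩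
      · simp at h1
  | case3 d dep ih =>
      rw [List.pairwise_cons] at hd
      simp only [pvMerge]
      refine List.pairwise_cons.mpr ⟨?_, ih ha hd.2⟩
      intro p hp
      rcases pvMerge_mem hp with ⟨h2, h1⟩ | ⟨h2, h1⟩
      · simp at h1
      · rcases lt_or_eq_of_le (hd.1 _ h1) with h | h
        · exact Or.inl h
        · exact Or.inr ⟨h, by omega⟩
  | case4 a arr d dep hlt ih =>
      rw [List.pairwise_cons] at ha
      simp only [pvMerge, if_pos hlt]
      refine List.pairwise_cons.mpr ⟨?_, ih ha.2 hd⟩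
      intro p hp
      rcases pvMerge_mem hp with ⟨h2, h1⟩ | ⟨h2, h1⟩
      · rcases lt_or_eq_of_le (ha.1 _ h1) with h | h
        · exact Or.inl h
        · exact Or.inr ⟨h, by omega⟩
      · rcases List.mem_cons.mp h1 with rfl | h1
        · exact Or.inl hlt
        · have := (List.pairwise_cons.mp hd).1 _ h1
          exact Or.inl (lt_of_lt_of_le hlt this)
  | case5 a arr d dep hlt ih =>
      have hle : d ≤ a := le_of_not_gt hlt
      rw [List.pairwise_cons] at hd
      simp only [pvMerge, if_neg hlt]
      refine List.pairwise_cons.mpr ⟨?_, ih ha hd.2⟩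
      intro p hp
      rcases pvMerge_mem hp with ⟨h2, h1⟩ | ⟨h2, h1⟩
      · rcases List.mem_cons.mp h1 with rfl | h1
        · rcases lt_or_eq_of_le hle with h | h
          · exact Or.inl h
          · exact Or.inr ⟨h, by omega⟩
        · have hax := (List.pairwise_cons.mp ha).1 _ h1
          rcases lt_or_eq_of_le (le_trans hle hax) with h | h
          · exact Or.inl h
          · exact Or.inr ⟨h, by omega⟩
      · rcases lt_or_eq_of_le (hd.1 _ h1) with h | h
        · exact Or.inl h
        · exact Or.inr ⟨h, by omega⟩

-- Python's tuple sort (sorted2 with keys fst, snd) is sorted with the lexicographic key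
theorem sorted2_eq_sorted_toLex (xs : List (Int × Int)) :
    PySem.List.sorted2 xs Prod.fst Prod.snd
      = PySem.List.sorted xs (fun p => (toLex p : Lex (Int × Int))) := by
  show List.foldl _ [] xs = List.foldl _ [] xs
  congr 1
  funext acc x
  congr 1
  funext a b
  rcases a with ⟨a1, a2⟩; rcases b with ⟨b1, b2⟩
  by_cases h1 : a1 < b1 <;> by_cases h2 : b1 < a1 <;> by_cases h3 : a2 < b2 <;>
    simp [h1, h2, h3, Prod.Lex.toLex_lt_toLex] <;> omega

theorem sorted_combined_eq_merge (arrive depart : List Int) :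
    PySem.List.sorted2
        (arrive.map (fun t => (t, (1 : Int))) ++ depart.map (fun t => (t, (-1 : Int))))
        Prod.fst Prod.snd
      = pvMerge (PySem.List.sorted arrive (fun x => x)) (PySem.List.sorted depart (fun x => x)) := by
  rw [sorted2_eq_sorted_toLex]
  apply PySem.List.eq_of_perm_of_pairwise_le_of_injective
    (fun p => (toLex p : Lex (Int × Int))) (fun a b h => h)
  · -- the two lists are permutations of each other
    refine (PySem.List.sorted_perm _ _ _).trans ?_
    refine ((pvMerge_perm _ _).trans ?_).symm
    exact List.Perm.append
      ((PySem.List.sorted_perm arrive (fun x => x) false).map _)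
      ((PySem.List.sorted_perm depart (fun x => x) false).map _)
  · exact PySem.List.sorted_pairwise _ _
  · have hp := pvMerge_pairwise
      (PySem.List.sorted arrive (fun x => x)) (PySem.List.sorted depart (fun x => x))
      (by simpa using PySem.List.sorted_pairwise arrive (fun x => x))
      (by simpa using PySem.List.sorted_pairwise depart (fun x => x))
    refine hp.imp ?_
    intro a b hab
    exact Prod.Lex.toLex_le_toLex.mpr (hab.imp id (fun h => ⟨h.1, h.2⟩))

-- ===== VERDICT (by name: the statement is the Claim_ definition above) =====
theorem hotel_manager_spec : Claim_equal_hotel_manager := by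
  intro arrive depart k _
  show hotel_manager arrive depart k = hotel_manager_alt arrive depart k
  unfold hotel_manager hotel_manager_alt
  rw [sorted_combined_eq_merge, ← pvLoopB_eq_loopA]
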